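-- pv_equiv track=rewrite | github.com/bimurto/system-design-interview | 01-foundations/09-indexes/experiment.py | extract_plan_type
-- ===== SOURCE A (Python) =====
-- def extract_plan_type(explain_output):
--     """Extract the top-level scan type from EXPLAIN output.
--
--     Precedence: Index Only Scan > Index Scan > Bitmap Heap Scan > Seq Scan
--     so that composite plan names (Bitmap Heap Scan → Bitmap Index Scan) are
--     reported at the heap level (the outermost node the planner emits first).
--     """
--     found = set()
--     for line in explain_output:
--         text = line[0]
--         for scan in ["Index Only Scan", "Index Scan", "Bitmap Heap Scan",
--                      "Bitmap Index Scan", "Seq Scan"]: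
--             if scan in text:
--                 found.add(scan)
--     for preferred in ["Index Only Scan", "Index Scan", "Bitmap Heap Scan",
--                       "Bitmap Index Scan", "Seq Scan"]:
--         if preferred in found:
--             return preferred
--     return "Unknown"
-- ===== SOURCE B (Python) =====
-- def extract_plan_type(explain_output):
--     texts = [line[0] for line in explain_output]
--     for preferred in ["Index Only Scan", "Index Scan", "Bitmap Heap Scan",
--                       "Bitmap Index Scan", "Seq Scan"]:
--         if any(preferred in t for t in texts):
--             return preferred
--     return "Unknown"
-- ===== Notes on version B (the rewrite author's own statement) =====
-- stated objective: simpler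
-- what changed: Replaces A's collect-all-matches-into-a-set pass followed by a ranking pass with a precedence-first search: texts are extracted once, then the first precedence entry contained in any text is returned directly, dropping the intermediate found set.
import Mathlib
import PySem

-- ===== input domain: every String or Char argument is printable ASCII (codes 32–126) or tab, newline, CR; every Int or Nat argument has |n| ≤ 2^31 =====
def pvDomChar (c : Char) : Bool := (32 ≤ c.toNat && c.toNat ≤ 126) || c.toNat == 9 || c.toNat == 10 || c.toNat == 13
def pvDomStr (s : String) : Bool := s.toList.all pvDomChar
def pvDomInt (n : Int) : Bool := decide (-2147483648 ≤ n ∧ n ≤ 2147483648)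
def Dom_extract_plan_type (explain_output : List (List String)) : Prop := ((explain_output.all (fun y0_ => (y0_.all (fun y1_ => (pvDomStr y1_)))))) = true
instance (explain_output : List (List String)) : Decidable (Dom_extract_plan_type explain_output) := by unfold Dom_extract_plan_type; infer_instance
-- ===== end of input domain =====

-- B replaces A's collect-matches-into-a-set pass plus ranking pass with a direct
-- precedence-first search over the extracted texts (objective: simpler).

-- The precedence list both Pythons write literally.
def pvScans : List String :=
  ["Index Only Scan", "Index Scan", "Bitmap Heap Scan", "Bitmap Index Scan", "Seq Scan"]

-- ===== PORT A =====
-- the second for-loop of A with its early return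
def pvFirstFound : List String → PySem.Set String → String
  | [], _ => "Unknown"
  | p :: ps, found => if PySem.Set.contains found p then p else pvFirstFound ps found

def extract_plan_type (explain_output : List (List String)) : String :=
  let found : PySem.Set String :=
    explain_output.foldl (fun fnd line =>
      -- text = line[0]; Pre_ excludes empty lines, where Python raises IndexError
      let text := (PySem.List.pyGet? line 0).getD ""
      pvScans.foldl (fun f scan => if PySem.Str.isIn scan text then PySem.Set.add f scan else f) fnd)
      PySem.Set.empty
  pvFirstFound pvScans found

-- ===== PORT B =====
-- B's precedence loop: first entry contained in any text, with early return
def pvFirstAny : List String → List String → String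
  | [], _ => "Unknown"
  | p :: ps, texts => if texts.any (fun t => PySem.Str.isIn p t) then p else pvFirstAny ps texts

def extract_plan_type_alt (explain_output : List (List String)) : String :=
  let texts := explain_output.map (fun line => (PySem.List.pyGet? line 0).getD "")
  pvFirstAny pvScans texts

-- ===== PRECONDITION & SPEC =====
-- Pre_ excludes inputs containing an empty inner list, on which Python A (and B) raise IndexError at line[0].
def Pre_extract_plan_type (explain_output : List (List String)) : Prop :=
  ∀ line ∈ explain_output, line ≠ []
instance (explain_output : List (List String)) : Decidable (Pre_extract_plan_type explain_output) := by
  unfold Pre_extract_plan_type; infer_instance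

def pvWitness_extract_plan_type : List (List String) :=
  [["Bitmap Heap Scan on t"], ["Bitmap Index Scan on i"]]

def Spec_extract_plan_type (explain_output : List (List String)) (out : String) : Prop := out = extract_plan_type_alt explain_output
instance (explain_output : List (List String)) (out : String) : Decidable (Spec_extract_plan_type explain_output out) := by unfold Spec_extract_plan_type; infer_instance

-- ===== CLAIM (what is proved, stated in full; the proofs are below) =====
def Claim_equal_extract_plan_type : Prop := ∀ (explain_output : List (List String)), Dom_extract_plan_type explain_output → Pre_extract_plan_type explain_output → Spec_extract_plan_type explain_output (extract_plan_type explain_output)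

-- ===== LEMMAS AND PROOFS =====

-- inner loop of A: membership in the set after scanning one text
theorem pv_mem_inner (scans : List String) (text : String) (fnd : PySem.Set String) (p : String) :
    p ∈ scans.foldl (fun f scan => if PySem.Str.isIn scan text then PySem.Set.add f scan else f) fnd ↔
      p ∈ fnd ∨ (p ∈ scans ∧ PySem.Str.isIn p text = true) := by
  induction scans generalizing fnd with
  | nil => simp
  | cons s ss ih =>
      simp only [List.foldl_cons, ih]
      by_cases h : PySem.Str.isIn s text = true
      · simp only [h, if_pos]
        constructor
        · rintro (hm | hm)
          · rcases (PySem.Set.mem_add _ _ _).1 hm with hm' | rfl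
            · exact Or.inl hm'
            · exact Or.inr ⟨List.mem_cons_self, h⟩
          · exact Or.inr ⟨List.mem_cons_of_mem _ hm.1, hm.2⟩
        · rintro (hm | ⟨hm, hin⟩)
          · exact Or.inl ((PySem.Set.mem_add _ _ _).2 (Or.inl hm))
          · rcases List.mem_cons.1 hm with rfl | hm'
            · exact Or.inl ((PySem.Set.mem_add _ _ _).2 (Or.inr rfl))
            · exact Or.inr ⟨hm', hin⟩
      · simp only [h, if_neg, Bool.false_eq_true, not_false_iff]
        constructor
        · rintro (hm | ⟨hm, hin⟩)
          · exact Or.inl hm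
          · exact Or.inr ⟨List.mem_cons_of_mem _ hm, hin⟩
        · rintro (hm | ⟨hm, hin⟩)
          · exact Or.inl hm
          · rcases List.mem_cons.1 hm with rfl | hm'
            · exact absurd hin h
            · exact Or.inr ⟨hm', hin⟩

-- outer loop of A: the final set's members
theorem pv_mem_found (xs : List (List String)) (fnd : PySem.Set String) (p : String) :
    p ∈ xs.foldl (fun fnd line =>
        let text := (PySem.List.pyGet? line 0).getD ""
        pvScans.foldl (fun f scan => if PySem.Str.isIn scan text then PySem.Set.add f scan else f) fnd) fnd ↔
      p ∈ fnd ∨ (p ∈ pvScans ∧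
        ∃ line ∈ xs, PySem.Str.isIn p ((PySem.List.pyGet? line 0).getD "") = true) := by
  induction xs generalizing fnd with
  | nil => simp
  | cons l ls ih =>
      simp only [List.foldl_cons, ih, pv_mem_inner]
      constructor
      · rintro ((hm | ⟨hs, hin⟩) | ⟨hs, line, hl, hin⟩)
        · exact Or.inl hm
        · exact Or.inr ⟨hs, l, List.mem_cons_self, hin⟩
        · exact Or.inr ⟨hs, line, List.mem_cons_of_mem _ hl, hin⟩
      · rintro (hm | ⟨hs, line, hl, hin⟩)
        · exact Or.inl (Or.inl hm)
        · rcases List.mem_cons.1 hl with rfl | hl'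
          · exact Or.inl (Or.inr ⟨hs, hin⟩)
          · exact Or.inr ⟨hs, line, hl', hin⟩

-- the two early-return loops agree when membership matches containment-in-some-text
theorem pv_first_eq (ps : List String) (found : PySem.Set String) (texts : List String)
    (h : ∀ p ∈ ps, (p ∈ found ↔ ∃ t ∈ texts, PySem.Str.isIn p t = true)) :
    pvFirstFound ps found = pvFirstAny ps texts := by
  induction ps with
  | nil => rfl
  | cons p ps ih =>
      have hp := h p List.mem_cons_self
      have hiff : (PySem.Set.contains found p = true) ↔ ((texts.any fun t => PySem.Str.isIn p t) = true) := by
        rw [PySem.Set.contains_iff, List.any_eq_true]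
        exact hp
      have hc : PySem.Set.contains found p = texts.any fun t => PySem.Str.isIn p t :=
        Bool.eq_iff_iff.2 hiff
      show (if PySem.Set.contains found p then p else pvFirstFound ps found) =
        (if texts.any (fun t => PySem.Str.isIn p t) then p else pvFirstAny ps texts)
      rw [hc]
      split_ifs with hb
      · rfl
      · exact ih (fun q hq => h q (List.mem_cons_of_mem _ hq))

-- ===== VERDICT (by name: the statement is the Claim_ definition above) =====
theorem extract_plan_type_spec : Claim_equal_extract_plan_type := by
  intro xs _ _
  unfold Spec_extract_plan_type extract_plan_type extract_plan_type_alt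
  apply pv_first_eq
  intro p _
  rw [pv_mem_found]
  simp only [PySem.Set.empty, List.not_mem_nil, false_or]
  constructor
  · rintro ⟨_, line, hl, hin⟩
    exact ⟨_, List.mem_map_of_mem hl, hin⟩
  · rintro ⟨t, ht, hin⟩
    rcases List.mem_map.1 ht with ⟨line, hl, rfl⟩
    exact ⟨‹p ∈ pvScans›, line, hl, hin⟩
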